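-- pv_equiv track=rewrite | github.com/ArchitWadehra/DSA | 4 Recursion 2.py | subset
-- ===== SOURCE A (Python) =====
-- import copy
--
-- def subset(lst):        #10
--     if len(lst) == 0:
--         return [[0]]
--
--     sa = subset(lst[:-1])
--     dup = copy.deepcopy(sa)
--
--     for i in sa:
--         i[0] += 1
--         i.append(lst[-1])
--
--     for i in sa:
--         dup.append(i)
--
--     return dup
--
-- lst = [2,1,3,5,4]
-- ===== SOURCE B (Python) =====
-- def subset(lst):
--     result = [[0]]
--     for e in lst:
--         result = result + [[s[0] + 1] + s[1:] + [e] for s in result]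
--     return result
-- ===== Notes on version B (the rewrite author's own statement) =====
-- stated objective: simpler
-- what changed: Replaced the deepcopy-and-mutate recursion on lst[:-1] by a single left-to-right iterative fold that doubles the result list by appending fresh count-bumped copies, with no recursion and no copying module.
import Mathlib
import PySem

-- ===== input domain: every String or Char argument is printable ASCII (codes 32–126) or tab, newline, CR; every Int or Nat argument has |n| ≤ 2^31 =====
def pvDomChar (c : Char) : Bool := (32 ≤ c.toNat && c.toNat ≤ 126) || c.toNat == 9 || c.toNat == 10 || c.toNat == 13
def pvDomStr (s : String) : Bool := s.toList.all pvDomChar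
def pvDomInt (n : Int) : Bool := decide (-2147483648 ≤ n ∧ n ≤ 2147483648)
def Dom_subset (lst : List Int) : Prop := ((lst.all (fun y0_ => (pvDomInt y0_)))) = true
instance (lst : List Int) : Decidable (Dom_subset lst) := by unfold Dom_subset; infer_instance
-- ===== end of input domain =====

-- B replaces A's deepcopy-and-mutate recursion on lst[:-1] by an iterative fold
-- that doubles the result per element (objective: simpler; return value only — A mutates its own recursive results, never the argument).

-- ===== PORT A =====
def subset (lst : List Int) : List (List Int) :=
  if lst.length == 0 then [[0]]
  else
    let sa := subset (PySem.List.slice lst none (some (-1)))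
    let dup := sa                                  -- copy.deepcopy(sa): fresh value
    -- first loop mutates each i of sa: i[0] += 1; i.append(lst[-1])
    let sa' := sa.map (fun i =>
      match PySem.List.pyGet? lst (-1), i with
      | some x, c :: rest => (c + 1) :: (rest ++ [x])
      | _, i => i)                                 -- unreachable: lst ≠ [] and every i nonempty
    -- second loop appends each mutated i to dup
    dup ++ sa'
termination_by lst.length
decreasing_by
  simp only [PySem.List.slice_to_neg_one]
  rename_i h
  simp at h
  cases lst with
  | nil => simp at h
  | cons a as => simp

-- ===== PORT B =====
def subset_alt (lst : List Int) : List (List Int) :=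
  lst.foldl
    (fun result e =>
      result ++ result.map (fun s =>
        (PySem.List.pyGetD s 0 0 + 1) :: (PySem.List.slice s (some 1) none ++ [e])))
    [[0]]

-- ===== PRECONDITION & SPEC =====
def Spec_subset (lst : List Int) (out : List (List Int)) : Prop := out = subset_alt lst
instance (lst : List Int) (out : List (List Int)) : Decidable (Spec_subset lst out) := by unfold Spec_subset; infer_instance

-- ===== CLAIM (what is proved, stated in full; the proofs are below) =====
def Claim_equal_subset : Prop := ∀ (lst : List Int), Dom_subset lst → Spec_subset lst (subset lst)

-- ===== LEMMAS AND PROOFS =====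

-- every subset produced by B's fold is nonempty (it carries its count in head position)
theorem subset_alt_aux_ne_nil (lst : List Int) (acc : List (List Int))
    (hacc : ∀ s ∈ acc, s ≠ []) :
    ∀ s ∈ lst.foldl
      (fun result e =>
        result ++ result.map (fun s =>
          (PySem.List.pyGetD s 0 0 + 1) :: (PySem.List.slice s (some 1) none ++ [e])))
      acc, s ≠ [] := by
  induction lst generalizing acc with
  | nil => exact hacc
  | cons e es ih =>
    refine ih _ ?_
    intro s hs
    rcases List.mem_append.mp hs with h | h
    · exact hacc s h
    · obtain ⟨t, _, rfl⟩ := List.mem_map.mp h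
      simp

theorem subset_alt_ne_nil (lst : List Int) : ∀ s ∈ subset_alt lst, s ≠ [] := by
  unfold subset_alt
  exact subset_alt_aux_ne_nil lst [[0]] (by simp)

theorem subset_eq_alt (lst : List Int) : subset lst = subset_alt lst := by
  induction lst using List.reverseRecOn with
  | nil => simp [subset, subset_alt]
  | append_singleton xs x ih =>
    rw [subset]
    simp only [List.length_append, List.length_singleton, PySem.List.slice_to_neg_one,
      List.dropLast_concat, PySem.List.pyGet?_neg_one_append_singleton]
    have hlen : (xs.length + 1 == 0) = false := by simp
    rw [hlen]
    simp only [Bool.false_eq_true, if_false, ih]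
    unfold subset_alt
    rw [List.foldl_append]
    simp only [List.foldl_cons, List.foldl_nil]
    congr 1
    apply List.map_congr_left
    intro s hs
    have hne := subset_alt_ne_nil xs s hs
    cases s with
    | nil => exact absurd rfl hne
    | cons c rest =>
      simp [PySem.List.pyGetD_zero_cons, PySem.List.slice_from_one]

-- ===== VERDICT (by name: the statement is the Claim_ definition above) =====
theorem subset_spec : Claim_equal_subset := by
  intro lst _
  unfold Spec_subset
  exact subset_eq_alt lst
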